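-- pv_equiv track=rewrite | github.com/AaryaPatil-24/RailSaathi | app.py | clean_rule_for_output
-- ===== SOURCE A (Python) =====
-- DISPLAY_PREFIXES = [
--     "railway guideline states that ",
--     "according to railway policy ",
--     "as per indian railways rules ",
--     "under current railway norms ",
--     "in indian railways operations ",
--     "official railway instructions mention that ",
--     "for passenger guidance railway rules say ",
--     "as per reservation manual ",
--     "as per ticketing policy ",
--     "railway administration clarifies that ",
--     "for train travel compliance ",
--     "under railway passenger charter ",
--     "as per official railway advisory ",
--     "under standard operating railway rules ",
-- ]
--
-- def clean_rule_for_output(rule: str) -> str: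
--     text = rule.strip()
--     changed = True
--     while changed:
--         changed = False
--         for prefix in DISPLAY_PREFIXES:
--             if text.startswith(prefix):
--                 text = text[len(prefix):].strip()
--                 changed = True
--     return text
-- ===== SOURCE B (Python) =====
-- DISPLAY_PREFIXES = [
--     "railway guideline states that ",
--     "according to railway policy ",
--     "as per indian railways rules ",
--     "under current railway norms ",
--     "in indian railways operations ",
--     "official railway instructions mention that ",
--     "for passenger guidance railway rules say ",
--     "as per reservation manual ",
--     "as per ticketing policy ",
--     "railway administration clarifies that ",
--     "for train travel compliance ",
--     "under railway passenger charter ",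
--     "as per official railway advisory ",
--     "under standard operating railway rules ",
-- ]
--
-- # Index the prefixes by their first word once; since no prefix is a prefix of
-- # another, at most one prefix can match at any moment, so matching only the
-- # bucket of the current first word is exact.
-- _BY_FIRST_WORD = {}
-- for _p in DISPLAY_PREFIXES:
--     _BY_FIRST_WORD.setdefault(_p.split(" ", 1)[0], []).append(_p)
--
-- def clean_rule_for_output(rule: str) -> str:
--     # Single pass with an integer cursor: no per-round slicing or re-strip.
--     # The right end is stripped once; each round we look up the word at the
--     # cursor in the first-word index, advance past the matched prefix, and
--     # skip the following whitespace.
--     s = rule.strip()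
--     n = len(s)
--     i = 0
--     while True:
--         j = i
--         while j < n and not s[j].isspace():
--             j += 1
--         for p in _BY_FIRST_WORD.get(s[i:j], ()):
--             if s.startswith(p, i):
--                 i += len(p)
--                 while i < n and s[i].isspace():
--                     i += 1
--                 break
--         else:
--             return s[i:]
-- ===== Notes on version B (the rewrite author's own statement) =====
-- stated objective: alternative
-- what changed: Replaces A's changed-flag passes that rescan all 14 startswith tests and re-slice+re-strip the string each round with a single integer cursor over the once-stripped string plus a dict index of the prefixes keyed by first word: each round reads the word at the cursor, probes only that bucket, advances the cursor past the match and the following whitespace, and slices once at the end; exact because no prefix is a prefix of another.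
import Mathlib
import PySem

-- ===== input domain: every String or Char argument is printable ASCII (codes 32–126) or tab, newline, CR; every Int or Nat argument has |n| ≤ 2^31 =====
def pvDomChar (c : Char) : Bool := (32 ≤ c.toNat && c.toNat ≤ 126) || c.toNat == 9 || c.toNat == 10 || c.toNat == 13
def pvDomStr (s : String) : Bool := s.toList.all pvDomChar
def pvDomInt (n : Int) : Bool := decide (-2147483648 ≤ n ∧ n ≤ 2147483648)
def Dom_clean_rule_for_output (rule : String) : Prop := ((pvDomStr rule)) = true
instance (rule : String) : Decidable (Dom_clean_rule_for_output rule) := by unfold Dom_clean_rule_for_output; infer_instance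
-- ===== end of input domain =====

-- B replaces A's changed-flag passes (re-slice + re-strip, 14 startswith tests per
-- round) with one integer cursor over the once-stripped string and a dict of the
-- prefixes indexed by first word (exact: no prefix is a prefix of another).

def DISPLAY_PREFIXES : List String := [
  "railway guideline states that ",
  "according to railway policy ",
  "as per indian railways rules ",
  "under current railway norms ",
  "in indian railways operations ",
  "official railway instructions mention that ",
  "for passenger guidance railway rules say ",
  "as per reservation manual ",
  "as per ticketing policy ",
  "railway administration clarifies that ",
  "for train travel compliance ",
  "under railway passenger charter ",
  "as per official railway advisory ",
  "under standard operating railway rules "]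

-- dropping a matched prefix and re-stripping never lengthens the text
lemma pvStripLenLe (cs : List Char) : (PySem.Chars.strip cs).length ≤ cs.length := by
  calc (PySem.Chars.strip cs).length
      = (List.dropWhile PySem.Chars.isspace
          (List.dropWhile PySem.Chars.isspace cs).reverse).length := by
        simp [PySem.Chars.strip, PySem.Chars.rstrip, PySem.Chars.lstrip]
    _ ≤ (List.dropWhile PySem.Chars.isspace cs).reverse.length :=
        List.length_dropWhile_le _ _
    _ = (List.dropWhile PySem.Chars.isspace cs).length := by simp
    _ ≤ cs.length := List.length_dropWhile_le _ _

-- ...and strictly shortens it when the matched prefix is nonempty (A's step)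
lemma pvStepLt (t p : String) (hp : p.toList ≠ [])
    (h : PySem.Str.startswith t p = true) :
    (PySem.Str.strip (PySem.Str.slice t (some (PySem.Str.len p)) none)).toList.length
      < t.toList.length := by
  have hpre : p.toList <+: t.toList := by
    rw [PySem.Str.startswith_eq] at h
    exact (PySem.Chars.startswith_iff _ _).1 h
  have hlen : p.toList.length ≤ t.toList.length := hpre.length_le
  have hb : (PySem.Str.slice t (some (PySem.Str.len p)) none).toList
      = t.toList.drop p.toList.length := by
    simp [PySem.Str.toList_slice, PySem.Str.len,
      PySem.Chars.slice_eq_listSlice, PySem.List.slice_from_natCast]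
  calc (PySem.Str.strip (PySem.Str.slice t (some (PySem.Str.len p)) none)).toList.length
      ≤ (PySem.Str.slice t (some (PySem.Str.len p)) none).toList.length := by
        rw [PySem.Str.toList_strip]; exact pvStripLenLe _
    _ = t.toList.length - p.toList.length := by rw [hb, List.length_drop]
    _ < t.toList.length := by
        have : 0 < p.toList.length := List.length_pos_iff.2 hp
        omega

lemma pvPrefixesNonempty : ∀ p ∈ DISPLAY_PREFIXES, p.toList ≠ [] := by decide

-- ===== PORT A =====
-- one iteration of A's inner `for prefix in DISPLAY_PREFIXES` body, state (text, changed)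
def aStep (tc : String × Bool) (p : String) : String × Bool :=
  if PySem.Str.startswith tc.1 p then
    (PySem.Str.strip (PySem.Str.slice tc.1 (some (PySem.Str.len p)) none), true)
  else tc

lemma pvFoldLenLe : ∀ (L : List String) (t : String) (c : Bool),
    (L.foldl aStep (t, c)).1.toList.length ≤ t.toList.length := by
  intro L
  induction L with
  | nil => intro t c; exact le_rfl
  | cons p L ih =>
    intro t c
    simp only [List.foldl_cons, aStep]
    by_cases h : PySem.Str.startswith t p = true
    · simp only [h, if_true]
      refine (ih _ _).trans ?_
      rcases eq_or_ne p.toList [] with hp | hp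
      · have : (PySem.Str.slice t (some (PySem.Str.len p)) none).toList = t.toList := by
          simp [PySem.Str.toList_slice, PySem.Str.len,
            PySem.Chars.slice_eq_listSlice, hp]
        calc (PySem.Str.strip _).toList.length
            ≤ (PySem.Str.slice t (some (PySem.Str.len p)) none).toList.length := by
              rw [PySem.Str.toList_strip]; exact pvStripLenLe _
          _ = t.toList.length := by rw [this]
      · exact le_of_lt (pvStepLt t p hp h)
    · simp only [h]; exact ih t c

-- a pass that set `changed` strictly shrank the text (A's loop terminates)
lemma pvPassLt : ∀ (L : List String), (∀ p ∈ L, p.toList ≠ []) → ∀ t : String,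
    (L.foldl aStep (t, false)).2 = true →
    (L.foldl aStep (t, false)).1.toList.length < t.toList.length := by
  intro L hL
  induction L with
  | nil => intro t h; simp at h
  | cons p L ih =>
    intro t h
    simp only [List.foldl_cons, aStep] at h ⊢
    by_cases hs : PySem.Str.startswith t p = true
    · simp only [hs, if_true] at h ⊢
      exact lt_of_le_of_lt (pvFoldLenLe L _ true)
        (pvStepLt t p (hL p (List.mem_cons_self)) hs)
    · simp only [hs] at h ⊢
      exact ih (fun q hq => hL q (List.mem_cons_of_mem _ hq)) t h

-- A: while changed: one full pass over the prefix list with a changed flag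
def aLoop (text : String) : String :=
  let r := DISPLAY_PREFIXES.foldl aStep (text, false)
  if h : r.2 = true then aLoop r.1 else r.1
termination_by text.toList.length
decreasing_by exact pvPassLt DISPLAY_PREFIXES pvPrefixesNonempty text h

def clean_rule_for_output (rule : String) : String :=
  aLoop (PySem.Str.strip rule)

-- ===== PORT B =====
-- p.split(" ", 1)[0] : the key under which prefix p is indexed
def keyOf (p : String) : String :=
  (((PySem.Str.splitMax? p " " 1).getD []).headD "")

-- module-level index build: _BY_FIRST_WORD.setdefault(p.split(" ",1)[0], []).append(p)
def bIndex : PySem.Dict String (List String) :=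
  (DISPLAY_PREFIXES.map (fun p => (keyOf p, p))).foldl
    (fun d q => d.modify q.1 [] (fun x => x ++ [q.2])) PySem.Dict.empty

-- every bucket of the index holds only prefixes from the list (for termination)
lemma pvBucketSub (c : String) (p : String) (hp : p ∈ bIndex.getD c []) :
    p ∈ DISPLAY_PREFIXES := by
  rw [bIndex, PySem.Dict.getD_foldl_modify_append, PySem.Dict.getD_empty,
    List.nil_append] at hp
  obtain ⟨⟨k, q⟩, hq, rfl⟩ := List.mem_map.1 hp
  obtain ⟨⟨k', q'⟩, hq', heq⟩ := List.mem_map.1 (List.mem_of_mem_filter hq)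
  obtain ⟨rfl, rfl⟩ := Prod.mk.injEq .. ▸ heq
  simpa using hq'

-- B's step strictly shortens the remaining suffix
lemma pvStepLtL (cs : List Char) (p : String) (hp : p.toList ≠ [])
    (h : PySem.Chars.startswith cs p.toList = true) :
    ((cs.drop p.toList.length).dropWhile PySem.Chars.isspace).length < cs.length := by
  have hpre : p.toList <+: cs := (PySem.Chars.startswith_iff _ _).1 h
  have hl : 0 < p.toList.length := List.length_pos_iff.2 hp
  have hle : p.toList.length ≤ cs.length := hpre.length_le
  calc ((cs.drop p.toList.length).dropWhile PySem.Chars.isspace).length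
      ≤ (cs.drop p.toList.length).length := List.length_dropWhile_le _ _
    _ = cs.length - p.toList.length := List.length_drop ..
    _ < cs.length := by omega

-- B's loop: cursor = the remaining suffix of the once-stripped string;
-- each round: take the word at the cursor, probe only its bucket, advance
-- past the match and the following whitespace.
def bLoop (cs : List Char) : List Char :=
  match h : (bIndex.getD (String.ofList (cs.takeWhile (fun c => !PySem.Chars.isspace c))) []).find?
      (fun p => PySem.Chars.startswith cs p.toList) with
  | none => cs
  | some p => bLoop ((cs.drop p.toList.length).dropWhile PySem.Chars.isspace)
termination_by cs.length
decreasing_by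
  have hm := List.find?_some h
  exact pvStepLtL cs p
    (pvPrefixesNonempty p (pvBucketSub _ p (List.mem_of_find?_eq_some h))) hm

def clean_rule_for_output_alt (rule : String) : String :=
  String.ofList (bLoop (PySem.Str.strip rule).toList)

-- ===== PRECONDITION & SPEC =====
def Spec_clean_rule_for_output (rule : String) (out : String) : Prop := out = clean_rule_for_output_alt rule
instance (rule : String) (out : String) : Decidable (Spec_clean_rule_for_output rule out) := by unfold Spec_clean_rule_for_output; infer_instance

-- ===== CLAIM (what is proved, stated in full; the proofs are below) =====
def Claim_equal_clean_rule_for_output : Prop := ∀ (rule : String), Dom_clean_rule_for_output rule → Spec_clean_rule_for_output rule (clean_rule_for_output rule)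

-- ===== LEMMAS AND PROOFS =====

-- proof-side reference loop: repeatedly remove the first matching prefix (string form)
def bMatch (text : String) : Option String :=
  DISPLAY_PREFIXES.find? (fun p => PySem.Str.startswith text p)

def bLoopOld (text : String) : String :=
  match h : bMatch text with
  | none => text
  | some p => bLoopOld (PySem.Str.strip (PySem.Str.slice text (some (PySem.Str.len p)) none))
termination_by text.toList.length
decreasing_by
  exact pvStepLt text p (pvPrefixesNonempty p (List.mem_of_find?_eq_some h))
    (List.find?_some h)

-- no prefix in the list is a prefix of another (so at most one matches at a time)
lemma pvNoMutualPrefix : ∀ p ∈ DISPLAY_PREFIXES, ∀ q ∈ DISPLAY_PREFIXES,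
    p.toList <+: q.toList → p = q := by decide

lemma pvUniqueMatch (cs : List Char) (p q : String) (hp : p ∈ DISPLAY_PREFIXES)
    (hq : q ∈ DISPLAY_PREFIXES) (h1 : p.toList <+: cs) (h2 : q.toList <+: cs) : p = q := by
  rcases List.prefix_or_prefix_of_prefix h1 h2 with h | h
  · exact pvNoMutualPrefix p hp q hq h
  · exact (pvNoMutualPrefix q hq p hp h).symm

lemma pvFindMatch (t p : String) (hp : p ∈ DISPLAY_PREFIXES)
    (h : PySem.Str.startswith t p = true) : bMatch t = some p := by
  have hsome : (bMatch t).isSome := by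
    rw [bMatch, List.find?_isSome]; exact ⟨p, hp, h⟩
  obtain ⟨q, hqeq⟩ := Option.isSome_iff_exists.1 hsome
  have hq : q ∈ DISPLAY_PREFIXES := List.mem_of_find?_eq_some hqeq
  have hqs : PySem.Str.startswith t q = true := List.find?_some hqeq
  rw [hqeq]
  rw [PySem.Str.startswith_eq] at h hqs
  exact congrArg some (pvUniqueMatch t.toList q p hq hp
    ((PySem.Chars.startswith_iff _ _).1 hqs) ((PySem.Chars.startswith_iff _ _).1 h))

-- B is insensitive to the extra steps A's single pass performs
lemma pvPassBLoop : ∀ (L : List String), (∀ p ∈ L, p ∈ DISPLAY_PREFIXES) →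
    ∀ (t : String) (c : Bool), bLoopOld ((L.foldl aStep (t, c)).1) = bLoopOld t := by
  intro L
  induction L with
  | nil => intro _ t c; rfl
  | cons p L ih =>
    intro hL t c
    simp only [List.foldl_cons, aStep]
    by_cases h : PySem.Str.startswith t p = true
    · simp only [h, if_true]
      rw [ih (fun q hq => hL q (List.mem_cons_of_mem _ hq))]
      conv_rhs => rw [bLoopOld]
      rw [pvFindMatch t p (hL p List.mem_cons_self) h]
    · simp only [h]
      exact ih (fun q hq => hL q (List.mem_cons_of_mem _ hq)) t c

lemma pvPassFalse : ∀ (L : List String) (t : String),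
    (L.foldl aStep (t, false)).2 = false →
    (L.foldl aStep (t, false)).1 = t ∧ ∀ p ∈ L, PySem.Str.startswith t p = false := by
  intro L
  induction L with
  | nil => intro t _; exact ⟨rfl, by simp⟩
  | cons p L ih =>
    intro t h
    simp only [List.foldl_cons, aStep] at h ⊢
    by_cases hs : PySem.Str.startswith t p = true
    · exfalso
      simp only [hs, if_true] at h
      have hmono : ∀ (M : List String) (s : String), (M.foldl aStep (s, true)).2 = true := by
        intro M
        induction M with
        | nil => intro s; rfl
        | cons q M ihm =>
          intro s
          simp only [List.foldl_cons, aStep]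
          by_cases hq : PySem.Str.startswith s q = true
          · simp only [hq, if_true]; exact ihm _
          · simp only [hq]; exact ihm s
      rw [hmono] at h; simp at h
    · simp only [hs] at h ⊢
      obtain ⟨h1, h2⟩ := ih t h
      refine ⟨h1, fun q hq => ?_⟩
      rcases List.mem_cons.1 hq with rfl | hq'
      · exact Bool.not_eq_true _ |>.mp hs
      · exact h2 q hq'

lemma pvLoopEqOld : ∀ (n : Nat) (t : String), t.toList.length ≤ n → aLoop t = bLoopOld t := by
  intro n
  induction n using Nat.strong_induction_on with
  | _ n ih =>
    intro t ht
    rw [aLoop.eq_def]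
    by_cases hflag : (DISPLAY_PREFIXES.foldl aStep (t, false)).2 = true
    · rw [dif_pos hflag]
      have hlt := pvPassLt DISPLAY_PREFIXES pvPrefixesNonempty t hflag
      rw [ih _ (lt_of_lt_of_le hlt ht) _ le_rfl]
      exact pvPassBLoop DISPLAY_PREFIXES (fun p hp => hp) t false
    · rw [dif_neg hflag]
      obtain ⟨h1, h2⟩ := pvPassFalse DISPLAY_PREFIXES t (Bool.not_eq_true _ |>.mp hflag)
      rw [h1]
      have hnone : bMatch t = none := by
        rw [bMatch, List.find?_eq_none]
        intro p hp
        have h2' := h2 p hp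
        rw [PySem.Str.startswith_eq] at h2'
        simp [h2']
      rw [bLoopOld.eq_def, hnone]

-- === bridging bLoopOld (string form) to bLoop (cursor + first-word index) ===

-- the word before the first blank of each prefix: space-free, followed by ' '
lemma pvKeyFacts : ∀ p ∈ DISPLAY_PREFIXES,
    (keyOf p).toList.all (fun c => !PySem.Chars.isspace c) = true ∧
    (keyOf p).toList ++ [' '] <+: p.toList := by decide

lemma pvTakeWhileWord : ∀ (ws tail : List Char),
    ws.all (fun c => !PySem.Chars.isspace c) = true →
    (ws ++ ' ' :: tail).takeWhile (fun c => !PySem.Chars.isspace c) = ws := by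
  intro ws tail hws
  induction ws with
  | nil => simp [List.takeWhile_cons, PySem.Chars.isspace]
  | cons c ws ih =>
    simp only [List.all_cons, Bool.and_eq_true] at hws
    simp [List.takeWhile_cons, hws.1, ih hws.2]

-- the word at the cursor IS the matched prefix's key
lemma pvWordOf (cs : List Char) (p : String) (hp : p ∈ DISPLAY_PREFIXES)
    (h : p.toList <+: cs) :
    cs.takeWhile (fun c => !PySem.Chars.isspace c) = (keyOf p).toList := by
  obtain ⟨hall, hkey⟩ := pvKeyFacts p hp
  have hpre : (keyOf p).toList ++ [' '] <+: cs := hkey.trans h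
  obtain ⟨tail, htail⟩ := hpre
  rw [← htail, List.append_assoc, List.singleton_append]
  exact pvTakeWhileWord _ _ hall

lemma pvBucketMem (p : String) (hp : p ∈ DISPLAY_PREFIXES) :
    p ∈ bIndex.getD (keyOf p) [] := by
  rw [bIndex, PySem.Dict.getD_foldl_modify_append, PySem.Dict.getD_empty,
    List.nil_append]
  refine List.mem_map.2 ⟨(keyOf p, p), List.mem_filter.2 ⟨List.mem_map.2 ⟨p, hp, rfl⟩, ?_⟩, rfl⟩
  simp

-- B's bucketed find agrees with the full-list find
lemma pvFindBucket (cs : List Char) (p : String) (hp : p ∈ DISPLAY_PREFIXES)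
    (h : PySem.Chars.startswith cs p.toList = true) :
    (bIndex.getD (String.ofList (cs.takeWhile (fun c => !PySem.Chars.isspace c))) []).find?
      (fun q => PySem.Chars.startswith cs q.toList) = some p := by
  have hpre : p.toList <+: cs := (PySem.Chars.startswith_iff _ _).1 h
  rw [pvWordOf cs p hp hpre]
  rw [String.ofList_toList]
  have hsome : ((bIndex.getD (keyOf p) []).find?
      (fun q => PySem.Chars.startswith cs q.toList)).isSome := by
    rw [List.find?_isSome]; exact ⟨p, pvBucketMem p hp, h⟩
  obtain ⟨q, hqeq⟩ := Option.isSome_iff_exists.1 hsome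
  have hq : q ∈ DISPLAY_PREFIXES := pvBucketSub _ q (List.mem_of_find?_eq_some hqeq)
  have hqs := List.find?_some hqeq
  rw [hqeq]
  exact congrArg some (pvUniqueMatch cs q p hq hp
    ((PySem.Chars.startswith_iff _ _).1 hqs) hpre)

lemma pvFindBucketNone (cs : List Char)
    (h : ∀ p ∈ DISPLAY_PREFIXES, PySem.Chars.startswith cs p.toList = false) :
    (bIndex.getD (String.ofList (cs.takeWhile (fun c => !PySem.Chars.isspace c))) []).find?
      (fun q => PySem.Chars.startswith cs q.toList) = none := by
  rw [List.find?_eq_none]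
  intro p hp
  simp [h p (pvBucketSub _ p hp)]

-- suffixes of a right-stripped list are right-stripped
lemma pvRstripFixIff (xs : List Char) :
    PySem.Chars.rstrip xs = xs ↔ List.dropWhile PySem.Chars.isspace xs.reverse = xs.reverse := by
  constructor
  · intro h
    have := congrArg List.reverse h
    simpa [PySem.Chars.rstrip] using this
  · intro h
    simp [PySem.Chars.rstrip, h]

lemma pvSuffixRstrip (xs ys : List Char) (hsuf : xs <:+ ys)
    (hy : PySem.Chars.rstrip ys = ys) : PySem.Chars.rstrip xs = xs := by
  rw [pvRstripFixIff] at hy ⊢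
  rw [List.dropWhile_eq_self_iff] at hy ⊢
  intro hl
  obtain ⟨pre, hpre⟩ := hsuf
  have hxpre : xs.reverse <+: ys.reverse := by
    rw [← hpre]; simp
  have hy0 : 0 < ys.reverse.length := by
    have := hxpre.length_le
    omega
  obtain ⟨tl, htl⟩ := hxpre
  have hq : ys.reverse[0]? = xs.reverse[0]? := by
    rw [← htl]
    exact List.getElem?_append_left hl
  have h0 : ys.reverse[0]'hy0 = xs.reverse[0]'hl := by
    rw [List.getElem?_eq_getElem hy0, List.getElem?_eq_getElem hl] at hq
    exact Option.some.inj hq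
  intro hc
  exact hy hy0 ((congrArg PySem.Chars.isspace h0).trans hc)

-- with no trailing whitespace, strip after a drop is just a left dropWhile
lemma pvStripDrop (cs : List Char) (k : Nat) (h : PySem.Chars.rstrip cs = cs) :
    PySem.Chars.strip (cs.drop k) = (cs.drop k).dropWhile PySem.Chars.isspace := by
  have hsuf : (cs.drop k).dropWhile PySem.Chars.isspace <:+ cs :=
    (List.dropWhile_suffix _).trans (List.drop_suffix _ _)
  have := pvSuffixRstrip _ cs hsuf h
  simp only [PySem.Chars.strip, PySem.Chars.lstrip]
  exact this

-- main bridge: on right-stripped text the two loops agree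
lemma pvLoopEqNew : ∀ (n : Nat) (t : String), t.toList.length ≤ n →
    PySem.Chars.rstrip t.toList = t.toList →
    bLoopOld t = String.ofList (bLoop t.toList) := by
  intro n
  induction n using Nat.strong_induction_on with
  | _ n ih =>
    intro t ht hr
    rw [bLoopOld.eq_def, bLoop.eq_def]
    by_cases hm : ∃ p ∈ DISPLAY_PREFIXES, PySem.Str.startswith t p = true
    · obtain ⟨p, hp, hps⟩ := hm
      have hcs : PySem.Chars.startswith t.toList p.toList = true := by
        rw [← PySem.Str.startswith_eq]; exact hps
      rw [pvFindMatch t p hp hps, pvFindBucket t.toList p hp hcs]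
      simp only
      have hargs : (PySem.Str.strip (PySem.Str.slice t (some (PySem.Str.len p)) none)).toList
          = (t.toList.drop p.toList.length).dropWhile PySem.Chars.isspace := by
        have hb : (PySem.Str.slice t (some (PySem.Str.len p)) none).toList
            = t.toList.drop p.toList.length := by
          simp [PySem.Str.toList_slice, PySem.Str.len,
            PySem.Chars.slice_eq_listSlice, PySem.List.slice_from_natCast]
        rw [PySem.Str.toList_strip, hb, pvStripDrop t.toList p.toList.length hr]
      have hlt : (PySem.Str.strip (PySem.Str.slice t (some (PySem.Str.len p)) none)).toList.length
          < t.toList.length := pvStepLt t p (pvPrefixesNonempty p hp) hps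
      have hr' : PySem.Chars.rstrip
          (PySem.Str.strip (PySem.Str.slice t (some (PySem.Str.len p)) none)).toList
          = (PySem.Str.strip (PySem.Str.slice t (some (PySem.Str.len p)) none)).toList := by
        rw [hargs]
        exact pvSuffixRstrip _ t.toList
          ((List.dropWhile_suffix _).trans (List.drop_suffix _ _)) hr
      rw [ih _ (lt_of_lt_of_le hlt ht) _ le_rfl hr', hargs]
    · push_neg at hm
      have hall : ∀ p ∈ DISPLAY_PREFIXES, PySem.Str.startswith t p = false := by
        intro p hp
        exact Bool.not_eq_true _ |>.mp (hm p hp)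
      have hnone : bMatch t = none := by
        rw [bMatch, List.find?_eq_none]
        intro p hp
        have h' := hall p hp
        rw [PySem.Str.startswith_eq] at h'
        simp [h']
      have hnone2 := pvFindBucketNone t.toList (fun p hp => by
        have h' := hall p hp
        rw [PySem.Str.startswith_eq] at h'
        exact h')
      rw [hnone, hnone2]
      simp only
      exact String.ofList_toList.symm

lemma pvDropWhileIdem (p : Char → Bool) (l : List Char) :
    List.dropWhile p (List.dropWhile p l) = List.dropWhile p l := by
  rw [List.dropWhile_eq_self_iff]
  intro hl
  have hne : List.dropWhile p l ≠ [] := List.ne_nil_of_length_pos hl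
  have h := List.head_dropWhile_not p (l := l) hne
  rw [List.getElem_zero hl]
  simp [h]

-- the once-stripped string is right-stripped
lemma pvStripRstripFix (xs : List Char) :
    PySem.Chars.rstrip (PySem.Chars.strip xs) = PySem.Chars.strip xs := by
  simp only [PySem.Chars.strip, PySem.Chars.rstrip]
  rw [List.reverse_reverse, pvDropWhileIdem]

-- ===== VERDICT (by name: the statement is the Claim_ definition above) =====
theorem clean_rule_for_output_spec : Claim_equal_clean_rule_for_output := by
  intro rule _
  show clean_rule_for_output rule = clean_rule_for_output_alt rule
  rw [clean_rule_for_output, clean_rule_for_output_alt,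
    pvLoopEqOld (PySem.Str.strip rule).toList.length _ le_rfl]
  refine pvLoopEqNew (PySem.Str.strip rule).toList.length _ le_rfl ?_
  rw [PySem.Str.toList_strip]
  exact pvStripRstripFix rule.toList
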